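-- pv_equiv track=rewrite | github.com/wahabh7ck4r/-Problem-Solving-with-Python | common_character.py | Max_Common_Char
-- ===== SOURCE A (Python) =====
-- def Max_Common_Char(string):
--     letters = list(string)
--     com_word_ratio = {}
--
--     # Count the frequency of each character
--     for letter in letters:
--         if letter in com_word_ratio:
--             com_word_ratio[letter] += 1
--         else:
--             com_word_ratio[letter] = 1
--
--     # Find the maximum frequency
--     max_freq = max(com_word_ratio.values()) if com_word_ratio else 0
--
--     # Filter characters with the maximum frequency
--     most_common = [char for char, freq in com_word_ratio.items() if freq == max_freq]
--
--     # Sort the most common characters alphabetically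
--     most_common_sorted = sorted(most_common)
--
--     return most_common_sorted
-- ===== SOURCE B (Python) =====
-- def Max_Common_Char(string):
--     s = sorted(string)
--     n = len(s)
--     best = 0
--     result = []
--     i = 0
--     while i < n:
--         j = i + 1
--         while j < n and s[j] == s[i]:
--             j += 1
--         count = j - i
--         if count > best:
--             best = count
--             result = [s[i]]
--         elif count == best:
--             result.append(s[i])
--         i = j
--     return result
-- ===== Notes on version B (the rewrite author's own statement) =====
-- stated objective: alternative
-- what changed: Replaces the frequency dict + max + filter + final sort with sort-first then a single scan over consecutive equal-character runs that tracks the best run length and collects maximal characters already in alphabetical order.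
import Mathlib
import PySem

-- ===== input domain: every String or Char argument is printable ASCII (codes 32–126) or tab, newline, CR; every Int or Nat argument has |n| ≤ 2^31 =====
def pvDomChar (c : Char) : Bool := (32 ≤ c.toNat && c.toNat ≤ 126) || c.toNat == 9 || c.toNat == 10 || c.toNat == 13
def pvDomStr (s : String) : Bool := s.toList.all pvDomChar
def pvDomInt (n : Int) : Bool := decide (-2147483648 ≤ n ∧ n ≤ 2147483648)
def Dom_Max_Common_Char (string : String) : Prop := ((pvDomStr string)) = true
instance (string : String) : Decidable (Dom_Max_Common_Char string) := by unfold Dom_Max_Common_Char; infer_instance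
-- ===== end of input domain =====

-- B sorts the characters first and scans the consecutive equal-character runs once, instead of A's frequency dict + max + filter + final sort; same return value everywhere.

-- ===== PORT A =====
def Max_Common_Char (string : String) : List String :=
  let letters := string.toList.map (fun c => String.singleton c)
  let com := letters.foldl (fun d letter =>
      if d.contains letter then d.insert letter (d.getD letter 0 + 1)
      else d.insert letter 1) (PySem.Dict.empty : PySem.Dict String Int)
  let maxFreq : Int := if com.items = [] then 0 else (PySem.List.max? com.values (fun v => v)).getD 0
  let mostCommon := (com.items.filter (fun p => p.2 == maxFreq)).map (fun p => p.1)
  PySem.List.sorted mostCommon (fun x => x) false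

-- ===== PORT B =====
-- the outer while loop of Source B: each step consumes one run of equal characters
def mccRunLoop : List String → Int → List String → List String
  | [], _, res => res
  | c :: rest, best, res =>
    let cnt : Int := 1 + ((rest.takeWhile (fun x => x == c)).length : Int)
    let r := rest.dropWhile (fun x => x == c)
    if best < cnt then mccRunLoop r cnt [c]
    else if cnt = best then mccRunLoop r best (res ++ [c])
    else mccRunLoop r best res
termination_by s _ _ => s.length
decreasing_by all_goals
  exact Nat.lt_succ_of_le (List.length_dropWhile_le _ _)

def Max_Common_Char_alt (string : String) : List String :=
  mccRunLoop (PySem.List.sorted (string.toList.map (fun c => String.singleton c)) (fun x => x) false) 0 []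

-- ===== PRECONDITION & SPEC =====
def Spec_Max_Common_Char (string : String) (out : List String) : Prop := out = Max_Common_Char_alt string
instance (string : String) (out : List String) : Decidable (Spec_Max_Common_Char string out) := by unfold Spec_Max_Common_Char; infer_instance

-- ===== CLAIM (what is proved, stated in full; the proofs are below) =====
def Claim_equal_Max_Common_Char : Prop := ∀ (string : String), Dom_Max_Common_Char string → Spec_Max_Common_Char string (Max_Common_Char string)

-- ===== LEMMAS AND PROOFS =====

lemma mcc_gt_of_mem_dropWhile (c : String) :
    ∀ (rest : List String), rest.Pairwise (· ≤ ·) → (∀ y ∈ rest, c ≤ y) →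
      ∀ x ∈ rest.dropWhile (fun x => x == c), c < x := by
  intro rest
  induction rest with
  | nil => intro _ _ x hx; simp [List.dropWhile] at hx
  | cons y ys ih =>
    intro hp hle x hx
    rw [List.dropWhile_cons] at hx
    by_cases hyc : y == c
    · simp [hyc] at hx
      exact ih hp.of_cons (fun z hz => hle z (List.mem_cons_of_mem _ hz)) x hx
    · simp [hyc] at hx
      have hcy : c < y := lt_of_le_of_ne (hle y (List.mem_cons_self)) (by simpa [eq_comm] using (beq_iff_eq (a := y) (b := c)).not.mp (by simpa using hyc))
      rcases hx with rfl | hx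
      · exact hcy
      · exact lt_of_lt_of_le hcy ((List.pairwise_cons.mp hp).1 x hx)

-- run-decomposition facts for a sorted c :: rest
lemma mcc_drop_gt {c : String} {rest : List String} (hp : (c :: rest).Pairwise (· ≤ ·)) :
    ∀ x ∈ rest.dropWhile (fun x => x == c), c < x :=
  mcc_gt_of_mem_dropWhile c rest hp.of_cons (List.pairwise_cons.mp hp).1

lemma mcc_drop_pairwise {c : String} {rest : List String} (hp : (c :: rest).Pairwise (· ≤ ·)) :
    (rest.dropWhile (fun x => x == c)).Pairwise (· ≤ ·) :=
  (List.Pairwise.sublist (List.dropWhile_sublist _) hp.of_cons)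

lemma mcc_count_self {c : String} {rest : List String} (hp : (c :: rest).Pairwise (· ≤ ·)) :
    (c :: rest).count c = 1 + (rest.takeWhile (fun x => x == c)).length := by
  have ht : (rest.takeWhile (fun x => x == c)).count c = (rest.takeWhile (fun x => x == c)).length := by
    rw [List.count_eq_length]
    intro b hb
    have := List.mem_takeWhile_imp hb
    simp at this; simp [this]
  have hr : (rest.dropWhile (fun x => x == c)).count c = 0 := by
    rw [List.count_eq_zero]
    intro hc
    exact absurd (mcc_drop_gt hp c hc) (lt_irrefl c)
  conv_lhs => rw [List.count_cons_self, ← List.takeWhile_append_dropWhile (p := fun x => x == c) (l := rest)]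
  rw [List.count_append, ht, hr]
  omega

lemma mcc_count_ne {c x : String} {rest : List String} (hx : x ≠ c) :
    (c :: rest).count x = (rest.dropWhile (fun x => x == c)).count x := by
  have ht : (rest.takeWhile (fun x => x == c)).count x = 0 := by
    rw [List.count_eq_zero]
    intro hc
    have := List.mem_takeWhile_imp hc
    simp at this
    exact hx this
  have hsplit : rest.count x = (rest.takeWhile (fun x => x == c)).count x + (rest.dropWhile (fun x => x == c)).count x := by
    conv_lhs => rw [← List.takeWhile_append_dropWhile (p := fun x => x == c) (l := rest)]
    rw [List.count_append]
  rw [List.count_cons_of_ne (Ne.symm hx), hsplit, ht]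
  omega


lemma mcc_ind (P : List String → Prop) (h0 : P [])
    (hstep : ∀ c rest, P (rest.dropWhile (fun x => x == c)) → P (c :: rest)) : ∀ s, P s := by
  intro s
  induction hn : s.length using Nat.strong_induction_on generalizing s with
  | _ n ih =>
    cases s with
    | nil => exact h0
    | cons c rest =>
      refine hstep c rest (ih (rest.dropWhile (fun x => x == c)).length ?_ _ rfl)
      have := List.length_dropWhile_le (fun x => x == c) rest
      simp at hn; omega

def mccRunKeep (m : Int) : List String → List String
  | [] => []
  | c :: rest =>
    (if (1 + ((rest.takeWhile (fun x => x == c)).length : Int)) = m then [c] else []) ++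
      mccRunKeep m (rest.dropWhile (fun x => x == c))
termination_by s => s.length
decreasing_by all_goals
  exact Nat.lt_succ_of_le (List.length_dropWhile_le _ _)

lemma mem_mccRunKeep : ∀ {s : List String}, s.Pairwise (· ≤ ·) → ∀ (m : Int) (x : String),
    (x ∈ mccRunKeep m s ↔ x ∈ s ∧ (s.count x : Int) = m) := by
  intro s
  induction s using mcc_ind with
  | h0 => intro _ m x; simp [mccRunKeep]
  | hstep c rest ih =>
    intro hp m x
    rw [mccRunKeep]
    by_cases hxc : x = c
    · subst hxc
      have hnr : x ∉ rest.dropWhile (fun y => y == x) := fun hc => absurd (mcc_drop_gt hp x hc) (lt_irrefl x)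
      have := ih (mcc_drop_pairwise hp) m x
      simp only [List.mem_append, this]
      constructor
      · rintro (h | ⟨hmem, _⟩)
        · refine ⟨List.mem_cons_self, ?_⟩
          split at h
          · rw [mcc_count_self hp]; push_cast; omega
          · simp at h
        · exact absurd hmem hnr
      · rintro ⟨-, hcnt⟩
        left
        rw [mcc_count_self hp] at hcnt
        have : (1 + ((rest.takeWhile (fun y => y == x)).length : Int)) = m := by push_cast at hcnt ⊢; omega
        simp [this]
    · have hih := ih (mcc_drop_pairwise hp) m x
      have hcount := mcc_count_ne (rest := rest) hxc
      have hxmem : x ∈ rest.dropWhile (fun y => y == c) ↔ x ∈ c :: rest := by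
        constructor
        · intro h; exact List.mem_cons_of_mem _ ((List.dropWhile_sublist _).subset h)
        · intro h
          rcases List.mem_cons.mp h with rfl | h
          · exact absurd rfl hxc
          · conv_lhs at h => rw [← List.takeWhile_append_dropWhile (p := fun y => y == c) (l := rest)]
            rcases List.mem_append.mp h with h | h
            · have := List.mem_takeWhile_imp h; simp at this; exact absurd this hxc
            · exact h
      simp only [List.mem_append, hih]
      constructor
      · rintro (h | ⟨hmem, hcnt⟩)
        · split at h <;> simp at h; exact absurd h hxc
        · refine ⟨hxmem.mp hmem, ?_⟩
          rw [hcount]; exact hcnt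
      · rintro ⟨hmem, hcnt⟩
        right
        refine ⟨hxmem.mpr hmem, ?_⟩
        rw [hcount] at hcnt; exact hcnt

def mccRunMax : List String → Int
  | [] => 0
  | c :: rest =>
    max (1 + ((rest.takeWhile (fun x => x == c)).length : Int)) (mccRunMax (rest.dropWhile (fun x => x == c)))
termination_by s => s.length
decreasing_by all_goals
  exact Nat.lt_succ_of_le (List.length_dropWhile_le _ _)

lemma mccRunMax_pos {s : List String} (hs : s ≠ []) : 1 ≤ mccRunMax s := by
  cases s with
  | nil => exact absurd rfl hs
  | cons c rest =>
    rw [mccRunMax]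
    have : (0:Int) ≤ ((rest.takeWhile (fun x => x == c)).length : Int) := Int.natCast_nonneg _
    exact le_max_of_le_left (by omega)

lemma pairwise_lt_mccRunKeep : ∀ {s : List String}, s.Pairwise (· ≤ ·) → ∀ (m : Int),
    (mccRunKeep m s).Pairwise (· < ·) := by
  intro s
  induction s using mcc_ind with
  | h0 => intro _ m; simp [mccRunKeep]
  | hstep c rest ih =>
    intro hp m
    rw [mccRunKeep]
    rw [List.pairwise_append]
    refine ⟨?_, ih (mcc_drop_pairwise hp) m, ?_⟩
    · split <;> simp
    · intro a ha b hb
      have hbr : b ∈ rest.dropWhile (fun x => x == c) :=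
        ((mem_mccRunKeep (mcc_drop_pairwise hp) m b).mp hb).1
      have hac : a = c := by split at ha <;> simp at ha; exact ha
      subst hac
      exact mcc_drop_gt hp b hbr

lemma count_le_mccRunMax : ∀ {s : List String}, s.Pairwise (· ≤ ·) →
    ∀ x ∈ s, (s.count x : Int) ≤ mccRunMax s := by
  intro s
  induction s using mcc_ind with
  | h0 => intro _ x hx; simp at hx
  | hstep c rest ih =>
    intro hp x hx
    rw [mccRunMax]
    by_cases hxc : x = c
    · subst hxc
      rw [mcc_count_self hp]
      exact le_max_of_le_left (by push_cast; omega)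
    · have hxr : x ∈ rest.dropWhile (fun y => y == c) := by
        rcases List.mem_cons.mp hx with rfl | h
        · exact absurd rfl hxc
        · conv_lhs at h => rw [← List.takeWhile_append_dropWhile (p := fun y => y == c) (l := rest)]
          rcases List.mem_append.mp h with h | h
          · have := List.mem_takeWhile_imp h; simp at this; exact absurd this hxc
          · exact h
      rw [mcc_count_ne hxc]
      exact le_max_of_le_right (ih (mcc_drop_pairwise hp) x hxr)

lemma mccRunMax_attained : ∀ {s : List String}, s.Pairwise (· ≤ ·) → s ≠ [] →
    ∃ x ∈ s, (s.count x : Int) = mccRunMax s := by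
  intro s
  induction s using mcc_ind with
  | h0 => intro _ hs; exact absurd rfl hs
  | hstep c rest ih =>
    intro hp _
    rw [mccRunMax]
    rcases le_or_gt (mccRunMax (rest.dropWhile (fun x => x == c))) (1 + ((rest.takeWhile (fun x => x == c)).length : Int)) with hle | hlt
    · refine ⟨c, List.mem_cons_self, ?_⟩
      rw [mcc_count_self hp, max_eq_left hle]
      push_cast; omega
    · have hrne : rest.dropWhile (fun x => x == c) ≠ [] := by
        intro hnil
        rw [hnil] at hlt
        simp [mccRunMax] at hlt
        omega
      obtain ⟨x, hxm, hxc⟩ := ih (mcc_drop_pairwise hp) hrne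
      have hxne : x ≠ c := fun h => absurd (mcc_drop_gt hp x hxm) (by rw [h]; exact lt_irrefl c)
      refine ⟨x, List.mem_cons_of_mem _ ((List.dropWhile_sublist _).subset hxm), ?_⟩
      rw [mcc_count_ne hxne, hxc, max_eq_right (le_of_lt hlt)]

lemma mccRunLoop_eq_spec : ∀ {s : List String}, ∀ (best : Int) (res : List String), 0 ≤ best →
    mccRunLoop s best res =
      if best < mccRunMax s then mccRunKeep (mccRunMax s) s else res ++ mccRunKeep best s := by
  intro s
  induction s using mcc_ind with
  | h0 =>
    intro best res hb
    simp [mccRunLoop, mccRunMax, mccRunKeep, not_lt.mpr hb]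
  | hstep c rest ih =>
    intro best res hb
    set a : Int := 1 + ((rest.takeWhile (fun x => x == c)).length : Int) with ha
    set r := rest.dropWhile (fun x => x == c) with hr
    have ha1 : 1 ≤ a := by rw [ha]; have := Int.natCast_nonneg (rest.takeWhile (fun x => x == c)).length; omega
    set b := mccRunMax r with hbdef
    have hmax : mccRunMax (c :: rest) = max a b := by rw [mccRunMax]
    have hkeep : ∀ m, mccRunKeep m (c :: rest) = (if a = m then [c] else []) ++ mccRunKeep m r := by
      intro m; rw [mccRunKeep]
    rw [mccRunLoop, hmax]
    simp only [← ha, ← hr]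
    by_cases h1 : best < a
    · rw [if_pos h1, ih a [c] (by omega)]
      rcases le_or_gt b a with hba | hab
      · rw [if_neg (not_lt.mpr hba), if_pos (lt_of_lt_of_le h1 (le_max_left a b)), max_eq_left hba, hkeep]
        simp
      · rw [if_pos hab, if_pos (lt_of_lt_of_le h1 (le_max_left a b)), max_eq_right (le_of_lt hab), hkeep]
        rw [if_neg (by omega)]
        simp
    · rw [if_neg h1]
      by_cases h2 : a = best
      · rw [if_pos h2, ih best (res ++ [c]) hb]
        by_cases h3 : best < b
        · rw [if_pos h3, if_pos (lt_of_lt_of_le h3 (le_max_right a b)), max_eq_right (by omega), hkeep]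
          rw [if_neg (by omega)]
          simp
        · rw [if_neg h3, if_neg (by rw [not_lt] at h3 ⊢; exact max_le (by omega) h3), hkeep]
          rw [if_pos h2]
          simp
      · rw [if_neg h2, ih best res hb]
        have h4 : a < best := by omega
        by_cases h3 : best < b
        · rw [if_pos h3, if_pos (lt_of_lt_of_le h3 (le_max_right a b)), max_eq_right (by omega), hkeep]
          rw [if_neg (by omega)]
          simp
        · rw [if_neg h3, if_neg (by rw [not_lt] at h3 ⊢; exact max_le (by omega) h3), hkeep]
          rw [if_neg h2]
          simp

lemma mcc_fold_eq_counter (xs : List String) :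
    xs.foldl (fun d letter =>
      if d.contains letter then d.insert letter (d.getD letter 0 + 1)
      else d.insert letter 1) (PySem.Dict.empty : PySem.Dict String Int) = PySem.Dict.counter xs := by
  rw [← PySem.Dict.foldl_insert_getD_add_one_eq_counter]
  congr 1
  funext d l
  by_cases h : d.contains l
  · simp [h]
  · have h0 : d.getD l 0 = 0 := PySem.Dict.getD_of_not_contains d 0 (by simpa using h)
    simp [h, h0]

lemma mcc_main (string : String) : Max_Common_Char string = Max_Common_Char_alt string := by
  simp only [Max_Common_Char, Max_Common_Char_alt]
  set xs := string.toList.map (fun c => String.singleton c) with hxsdef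
  rw [mcc_fold_eq_counter]
  set S := PySem.List.sorted xs (fun x => x) false with hSdef
  have hSperm : S.Perm xs := PySem.List.sorted_perm ..
  have hSp : S.Pairwise (· ≤ ·) := PySem.List.sorted_pairwise ..
  by_cases hxs : xs = []
  · rw [hxs] at hSdef ⊢
    have hS0 : S = [] := by rw [hSdef]; rfl
    rw [hS0, mccRunLoop]
    decide
  · have hSne : S ≠ [] := by rw [hSdef, Ne, PySem.List.sorted_eq_nil_iff]; exact hxs
    have hitems : (PySem.Dict.counter xs).items
        = (PySem.Set.ofList xs).map (fun k => (k, (xs.count k : Int))) := PySem.Dict.items_counter ..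
    have hofne : PySem.Set.ofList xs ≠ [] := by
      intro hnil
      obtain ⟨y, hy⟩ := List.exists_mem_of_ne_nil xs hxs
      have : y ∈ PySem.Set.ofList xs := (PySem.Set.mem_ofList _ _).mpr hy
      rw [hnil] at this; simp at this
    have hitems_ne : (PySem.Dict.counter xs).items ≠ [] := by
      rw [hitems]; simpa using hofne
    rw [if_neg hitems_ne]
    have hvals : (PySem.Dict.counter xs).values = (PySem.Set.ofList xs).map (fun k => (xs.count k : Int)) := by
      show ((PySem.Dict.counter xs).items).map (·.2) = _
      rw [hitems, List.map_map]
      rfl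
    have hvne : (PySem.Dict.counter xs).values ≠ [] := by
      rw [hvals]; simpa using hofne
    obtain ⟨M, hM⟩ : ∃ M, PySem.List.max? (PySem.Dict.counter xs).values (fun v => v) = some M := by
      cases h : PySem.List.max? (PySem.Dict.counter xs).values (fun v => v) with
      | none => exact absurd ((PySem.List.max?_eq_none_iff ..).mp h) hvne
      | some m => exact ⟨m, rfl⟩
    rw [hM]
    simp only [Option.getD_some]
    have hMmem : M ∈ (PySem.Dict.counter xs).values := PySem.List.max?_mem hM
    have hMub : ∀ v ∈ (PySem.Dict.counter xs).values, v ≤ M := by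
      intro v hv
      exact PySem.List.max?_isMax hM v hv
    have hcount : ∀ x : String, S.count x = xs.count x := fun x => hSperm.count_eq x
    have hmemS : ∀ x : String, x ∈ S ↔ x ∈ xs := fun x => PySem.List.mem_sorted ..
    have hMeq : M = mccRunMax S := by
      apply le_antisymm
      · rw [hvals] at hMmem
        obtain ⟨k, hk, hkM⟩ := List.mem_map.mp hMmem
        have hkxs : k ∈ xs := (PySem.Set.mem_ofList _ _).mp hk
        have := count_le_mccRunMax hSp k ((hmemS k).mpr hkxs)
        rw [hcount k] at this
        omega
      · obtain ⟨x, hxS, hxc⟩ := mccRunMax_attained hSp hSne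
        have hxxs : x ∈ xs := (hmemS x).mp hxS
        have hv : ((xs.count x : Int)) ∈ (PySem.Dict.counter xs).values := by
          rw [hvals]
          exact List.mem_map.mpr ⟨x, (PySem.Set.mem_ofList _ _).mpr hxxs, rfl⟩
        have := hMub _ hv
        rw [hcount x] at hxc
        omega
    have hloop : mccRunLoop S 0 [] = mccRunKeep M S := by
      rw [mccRunLoop_eq_spec 0 [] le_rfl, if_pos (by have := mccRunMax_pos hSne; omega), ← hMeq]
    rw [hloop]
    apply PySem.List.sorted_eq_of_perm_of_pairwise_lt
    · -- keep M S ~ mostCommon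
      have hmc : ((PySem.Dict.counter xs).items.filter (fun p => p.2 == M)).map (fun p => p.1)
          = (PySem.Set.ofList xs).filter (fun k => (xs.count k : Int) == M) := by
        rw [hitems, List.filter_map, List.map_map]
        simp [Function.comp_def]
      rw [hmc]
      rw [List.perm_ext_iff_of_nodup]
      · intro x
        rw [mem_mccRunKeep hSp M x, List.mem_filter]
        rw [hmemS x, hcount x, PySem.Set.mem_ofList]
        simp
      · exact ((pairwise_lt_mccRunKeep hSp M).imp ne_of_lt)
      · exact (PySem.Set.nodup_ofList ..).filter _
    · exact pairwise_lt_mccRunKeep hSp M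


-- ===== VERDICT (by name: the statement is the Claim_ definition above) =====
theorem Max_Common_Char_spec : Claim_equal_Max_Common_Char := by
  intro string _
  unfold Spec_Max_Common_Char
  exact mcc_main string
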